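-- pv_equiv track=rewrite | github.com/Santacruzluis/Juego_de_damas | juego_damas_agente_refuerzo.py | is_game_over
-- ===== SOURCE A (Python) =====
-- def is_game_over(board):
--     red_count = sum(row.count('R') + row.count('RK') for row in board)
--     black_count = sum(row.count('B') + row.count('BK') for row in board)
--     if red_count == 0:
--         return "IA"
--     elif black_count == 0:
--         return "Jugador"
--     return None
-- ===== SOURCE B (Python) =====
-- def is_game_over(board):
--     has_red = has_black = False
--     for row in board:
--         if not has_red and ('R' in row or 'RK' in row):
--             has_red = True
--         if not has_black and ('B' in row or 'BK' in row):
--             has_black = True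
--         if has_red and has_black:
--             return None
--     if not has_red:
--         return "IA"
--     if not has_black:
--         return "Jugador"
--     return None
-- ===== Notes on version B (the rewrite author's own statement) =====
-- stated objective: alternative
-- what changed: Replaces the two full counting scans over the whole board with a single existence-flag pass that sets has_red/has_black per row and returns None early once both colours are found.
import Mathlib
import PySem

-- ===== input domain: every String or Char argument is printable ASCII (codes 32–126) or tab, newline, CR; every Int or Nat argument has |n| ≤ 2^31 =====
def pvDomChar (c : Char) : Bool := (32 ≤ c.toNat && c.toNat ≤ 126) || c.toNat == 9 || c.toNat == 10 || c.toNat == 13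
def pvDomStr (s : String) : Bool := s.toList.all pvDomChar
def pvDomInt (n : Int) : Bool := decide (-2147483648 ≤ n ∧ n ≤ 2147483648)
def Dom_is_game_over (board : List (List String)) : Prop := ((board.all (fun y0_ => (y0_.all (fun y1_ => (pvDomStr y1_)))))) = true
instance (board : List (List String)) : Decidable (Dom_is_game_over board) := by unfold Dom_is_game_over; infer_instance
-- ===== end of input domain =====

-- B replaces A's two whole-board counting scans by one early-exiting pass that
-- tracks has_red/has_black existence flags (alternative decomposition, same cost class).

-- ===== PORT A =====
def is_game_over (board : List (List String)) : Option String :=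
  let red_count : Int :=
    (board.map (fun row => (PySem.List.count row "R" : Int) + (PySem.List.count row "RK" : Int))).sum
  let black_count : Int :=
    (board.map (fun row => (PySem.List.count row "B" : Int) + (PySem.List.count row "BK" : Int))).sum
  if red_count = 0 then some "IA"
  else if black_count = 0 then some "Jugador"
  else none

-- ===== PORT B =====
-- the for-loop of Source B with its two flags and early `return None`
def is_game_over_altGo (rows : List (List String)) (has_red has_black : Bool) : Option String :=
  match rows with
  | [] =>
      if !has_red then some "IA"
      else if !has_black then some "Jugador"
      else none
  | row :: rest =>
      let hr := if !has_red && (row.contains "R" || row.contains "RK") then true else has_red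
      let hb := if !has_black && (row.contains "B" || row.contains "BK") then true else has_black
      if hr && hb then none
      else is_game_over_altGo rest hr hb

def is_game_over_alt (board : List (List String)) : Option String :=
  is_game_over_altGo board false false

-- ===== PRECONDITION & SPEC =====
def Spec_is_game_over (board : List (List String)) (out : Option String) : Prop := out = is_game_over_alt board
instance (board : List (List String)) (out : Option String) : Decidable (Spec_is_game_over board out) := by unfold Spec_is_game_over; infer_instance

-- ===== CLAIM (what is proved, stated in full; the proofs are below) =====
def Claim_equal_is_game_over : Prop := ∀ (board : List (List String)), Dom_is_game_over board → Spec_is_game_over board (is_game_over board)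

-- ===== LEMMAS AND PROOFS =====

def pvRedRow (row : List String) : Bool := row.contains "R" || row.contains "RK"
def pvBlackRow (row : List String) : Bool := row.contains "B" || row.contains "BK"

theorem pv_step (hr hb p q ar ab : Bool) :
    (if ((if (!hr && p) = true then true else hr) && (if (!hb && q) = true then true else hb)) = true then (none : Option String)
     else if ((if (!hr && p) = true then true else hr) || ar) = true then
            if ((if (!hb && q) = true then true else hb) || ab) = true then none else some "Jugador"
          else some "IA")
    = if (hr || (p || ar)) = true then (if (hb || (q || ab)) = true then none else some "Jugador") else some "IA" := by
  cases hr <;> cases hb <;> cases p <;> cases q <;> cases ar <;> cases ab <;> rfl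

theorem pv_altGo_closed (rows : List (List String)) (hr hb : Bool) :
    is_game_over_altGo rows hr hb =
      if hr || rows.any pvRedRow then
        (if hb || rows.any pvBlackRow then none else some "Jugador")
      else some "IA" := by
  induction rows generalizing hr hb with
  | nil => cases hr <;> cases hb <;> simp [is_game_over_altGo]
  | cons row rest ih =>
      simp only [is_game_over_altGo, ih, List.any_cons, pvRedRow, pvBlackRow]
      exact pv_step hr hb (row.contains "R" || row.contains "RK")
        (row.contains "B" || row.contains "BK") (rest.any pvRedRow) (rest.any pvBlackRow)

theorem pv_pairsum_zero (f g : List String → Nat) (rows : List (List String)) :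
    ((rows.map (fun row => (f row : Int) + (g row : Int))).sum = 0) ↔
      rows.all (fun row => f row == 0 && g row == 0) = true := by
  induction rows with
  | nil => simp
  | cons row rest ih =>
      simp only [List.map_cons, List.sum_cons, List.all_cons]
      constructor
      · intro h
        have hnn : 0 ≤ (rest.map (fun row => (f row : Int) + (g row : Int))).sum := by
          apply List.sum_nonneg; intro x hx
          simp only [List.mem_map] at hx
          obtain ⟨r, _, rfl⟩ := hx; positivity
        have hf : (f row : Int) = 0 := by omega
        have hg : (g row : Int) = 0 := by omega
        have hs : (rest.map (fun row => (f row : Int) + (g row : Int))).sum = 0 := by omega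
        simp only [Nat.cast_eq_zero] at hf hg
        simp [hf, hg, ih.mp hs]
      · intro h
        simp only [Bool.and_eq_true, beq_iff_eq] at h
        obtain ⟨⟨hf, hg⟩, hrest⟩ := h
        have := ih.mpr (by simpa using hrest)
        simp [hf, hg, this]

theorem pv_count_zero_iff (rows : List (List String)) (a b : String) :
    (rows.all (fun row => PySem.List.count row a == 0 && PySem.List.count row b == 0) = true) ↔
      (rows.any (fun row => row.contains a || row.contains b) = false) := by
  simp only [List.all_eq_true, List.any_eq_false, Bool.and_eq_true, beq_iff_eq,
    PySem.List.count_eq, List.count_eq_zero, Bool.or_eq_true, List.contains_iff_mem,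
    not_or]

-- ===== VERDICT (by name: the statement is the Claim_ definition above) =====
theorem is_game_over_spec : Claim_equal_is_game_over := by
  intro board _
  unfold Spec_is_game_over is_game_over_alt
  rw [pv_altGo_closed]
  simp only [Bool.false_or]
  have hred := (pv_pairsum_zero (fun row => PySem.List.count row "R")
      (fun row => PySem.List.count row "RK") board).trans
      (pv_count_zero_iff board "R" "RK")
  have hblack := (pv_pairsum_zero (fun row => PySem.List.count row "B")
      (fun row => PySem.List.count row "BK") board).trans
      (pv_count_zero_iff board "B" "BK")
  simp only [is_game_over]
  by_cases h1 : (board.map (fun row => (PySem.List.count row "R" : Int) + (PySem.List.count row "RK" : Int))).sum = 0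
  · have hA : board.any pvRedRow = false := by simpa [pvRedRow] using hred.mp h1
    rw [if_pos h1, hA]; simp
  · have hA : board.any pvRedRow = true := by
      cases h : board.any pvRedRow
      · exact absurd (hred.mpr (by simpa [pvRedRow] using h)) h1
      · rfl
    rw [if_neg h1, hA]
    by_cases h2 : (board.map (fun row => (PySem.List.count row "B" : Int) + (PySem.List.count row "BK" : Int))).sum = 0
    · have hBf : board.any pvBlackRow = false := by simpa [pvBlackRow] using hblack.mp h2
      rw [if_pos h2, hBf]; simp
    · have hBt : board.any pvBlackRow = true := by
        cases h : board.any pvBlackRow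
        · exact absurd (hblack.mpr (by simpa [pvBlackRow] using h)) h2
        · rfl
      rw [if_neg h2, hBt]; simp
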